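-- pv_equiv track=rewrite | github.com/Firestar93/GAS_motifs | GainOfFunction/identify_SNPs_in_homologous_regions.py | expand_motif
-- ===== SOURCE A (Python) =====
-- def expand_motif(motif, substitutions):
--     """ Recursively expand the motif with the given substitutions. """
--     if not motif:
--         return ['']
--
--     # Expand the first character if it is in the substitutions
--     first_char = motif[0]
--     if first_char in substitutions:
--         expanded_first_chars = substitutions[first_char]
--     else:
--         expanded_first_chars = [first_char]
--
--     # Recursively expand the rest of the motif
--     expanded_rest = expand_motif(motif[1:], substitutions)
--
--     # Combine the expansions of the first character with the rest
--     expanded_motif = []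
--     for char in expanded_first_chars:
--         for suffix in expanded_rest:
--             expanded_motif.append(char + suffix)
--
--     return expanded_motif
-- ===== SOURCE B (Python) =====
-- def expand_motif(motif, substitutions):
--     """Iteratively expand the motif left-to-right: maintain the list of
--     expanded prefixes and extend each with the options of the next character."""
--     results = ['']
--     for c in motif:
--         opts = substitutions.get(c, [c])
--         results = [prefix + o for prefix in results for o in opts]
--     return results
-- ===== Notes on version B (the rewrite author's own statement) =====
-- stated objective: idiomatic
-- what changed: Replaced the recursive suffix-expansion (recurse on the tail, then prepend each option of the head) with a single iterative left-to-right pass that maintains the list of expanded prefixes and extends it per character.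
import Mathlib
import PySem

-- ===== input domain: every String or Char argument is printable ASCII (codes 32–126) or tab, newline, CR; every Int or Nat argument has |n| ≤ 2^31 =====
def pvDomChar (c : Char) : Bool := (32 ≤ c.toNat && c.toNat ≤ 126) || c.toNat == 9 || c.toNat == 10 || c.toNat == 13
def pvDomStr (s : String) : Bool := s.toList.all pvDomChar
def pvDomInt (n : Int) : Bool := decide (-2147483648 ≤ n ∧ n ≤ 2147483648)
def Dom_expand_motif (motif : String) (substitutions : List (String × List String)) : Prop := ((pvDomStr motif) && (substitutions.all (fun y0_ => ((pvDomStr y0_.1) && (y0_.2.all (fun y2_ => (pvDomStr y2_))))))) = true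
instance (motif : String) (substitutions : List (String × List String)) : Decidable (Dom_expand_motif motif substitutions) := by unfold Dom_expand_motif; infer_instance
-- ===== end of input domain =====

-- B replaces A's recursive suffix-expansion with an iterative left-to-right pfx pass (idiomatic; same cost).

-- ===== PORT A =====
-- A recurses on the motif; we recurse on its character list (motif[0] / motif[1:]).
def expandMotifRec (chars : List Char) (substitutions : List (String × List String)) : List String :=
  match chars with
  | [] => [""]
  | c :: rest =>
    let firstChar := String.ofList [c]
    let expandedFirstChars :=
      match (PySem.Dict.mk substitutions).get? firstChar with
      | some v => v
      | none => [firstChar]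
    let expandedRest := expandMotifRec rest substitutions
    expandedFirstChars.foldl
      (fun acc ch => expandedRest.foldl (fun acc2 suffix => acc2 ++ [ch ++ suffix]) acc) []

def expand_motif (motif : String) (substitutions : List (String × List String)) : List String :=
  expandMotifRec motif.toList substitutions

-- ===== PORT B =====
def expand_motif_alt (motif : String) (substitutions : List (String × List String)) : List String :=
  motif.toList.foldl
    (fun results c =>
      let s := String.ofList [c]
      let opts := ((PySem.Dict.mk substitutions).get? s).getD [s]
      results.flatMap (fun pfx => opts.map (fun o => pfx ++ o)))
    [""]

-- ===== PRECONDITION & SPEC =====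
def Spec_expand_motif (motif : String) (substitutions : List (String × List String)) (out : List String) : Prop := out = expand_motif_alt motif substitutions
instance (motif : String) (substitutions : List (String × List String)) (out : List String) : Decidable (Spec_expand_motif motif substitutions out) := by unfold Spec_expand_motif; infer_instance

-- ===== CLAIM (what is proved, stated in full; the proofs are below) =====
def Claim_equal_expand_motif : Prop := ∀ (motif : String) (substitutions : List (String × List String)), Dom_expand_motif motif substitutions → Spec_expand_motif motif substitutions (expand_motif motif substitutions)

-- ===== LEMMAS AND PROOFS =====

theorem foldl_append_singleton_map {α β : Type} (f : α → β) (l : List α) (acc : List β) :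
    l.foldl (fun a x => a ++ [f x]) acc = acc ++ l.map f := by
  induction l generalizing acc with
  | nil => simp
  | cons x xs ih => simp [List.foldl_cons, ih]

theorem outer_foldl_flatMap (rest : List String) (l : List String) (acc : List String) :
    l.foldl (fun a ch => rest.foldl (fun a2 s => a2 ++ [ch ++ s]) a) acc
      = acc ++ l.flatMap (fun ch => rest.map (fun s => ch ++ s)) := by
  induction l generalizing acc with
  | nil => simp
  | cons y ys ih =>
      rw [List.foldl_cons, foldl_append_singleton_map, ih]
      simp

theorem expandMotifRec_cons (c : Char) (rest : List Char)
    (substitutions : List (String × List String)) :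
    expandMotifRec (c :: rest) substitutions =
      (((PySem.Dict.mk substitutions).get? (String.ofList [c])).getD [String.ofList [c]]).flatMap
        (fun ch => (expandMotifRec rest substitutions).map (fun suffix => ch ++ suffix)) := by
  simp only [expandMotifRec]
  cases h : (PySem.Dict.mk substitutions).get? (String.ofList [c]) with
  | none =>
      simp only [Option.getD_none]
      rw [outer_foldl_flatMap]
      simp [List.flatMap]
  | some v =>
      simp only [Option.getD_some]
      rw [outer_foldl_flatMap]
      simp

theorem expand_motif_alt_invariant (chars : List Char)
    (substitutions : List (String × List String)) (acc : List String) :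
    chars.foldl
      (fun results c =>
        let s := String.ofList [c]
        let opts := ((PySem.Dict.mk substitutions).get? s).getD [s]
        results.flatMap (fun pfx => opts.map (fun o => pfx ++ o)))
      acc
    = acc.flatMap (fun p => (expandMotifRec chars substitutions).map (fun s => p ++ s)) := by
  induction chars generalizing acc with
  | nil => simp [expandMotifRec]
  | cons c rest ih =>
      rw [List.foldl_cons, ih, expandMotifRec_cons]
      simp [List.flatMap_map, List.map_flatMap, List.flatMap_assoc, List.map_map,
        Function.comp_def, String.append_assoc]

-- ===== VERDICT (by name: the statement is the Claim_ definition above) =====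
theorem expand_motif_spec : Claim_equal_expand_motif := by
  intro motif substitutions _
  unfold Spec_expand_motif expand_motif expand_motif_alt
  rw [expand_motif_alt_invariant]
  simp
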